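-- pv_equiv track=rewrite | github.com/mmz2000/atc-project | universal.py | decode1
-- ===== SOURCE A (Python) =====
-- def decode1(code: int) -> (int, int):
--     r = 1
--     x = 0
--     while (code + 1) % (r * 2) == 0:
--         r *= 2
--         x += 1
--     y = (((code + 1) // r) - 1) // 2
--     return (x, y)
-- ===== SOURCE B (Python) =====
-- def decode1(code: int) -> (int, int):
--     # halve n = code+1 until odd; the last divmod also yields y = (odd-1)//2
--     def odd_split(n, x):
--         q, s = divmod(n, 2)
--         if s == 0:
--             return odd_split(q, x + 1)
--         return (x, q)
--     return odd_split(code + 1, 0)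
-- ===== Notes on version B (the rewrite author's own statement) =====
-- stated objective: simpler
-- what changed: Instead of growing a modulus r=2^x and repeatedly testing (code+1) % (2r) with a final closed-form division, B recursively halves n=code+1 until it is odd; the final divmod's quotient is already the answer y, so the trailing formula disappears.
import Mathlib
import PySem

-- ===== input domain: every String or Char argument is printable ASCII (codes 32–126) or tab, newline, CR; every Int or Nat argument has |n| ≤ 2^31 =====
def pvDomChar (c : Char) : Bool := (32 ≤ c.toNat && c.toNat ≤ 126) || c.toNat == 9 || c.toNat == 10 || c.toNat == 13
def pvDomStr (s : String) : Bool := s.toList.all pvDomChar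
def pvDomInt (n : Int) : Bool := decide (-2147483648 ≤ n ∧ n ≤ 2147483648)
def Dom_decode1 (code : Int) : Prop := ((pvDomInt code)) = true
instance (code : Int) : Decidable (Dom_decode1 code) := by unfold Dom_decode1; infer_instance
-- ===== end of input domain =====

-- B replaces A's growing-modulus divisibility loop by a recursive halving of code+1
-- whose last divmod already yields the second component (simpler; return value only).

-- ===== PORT A =====
-- A's while-loop; the fuel (64) is only a totality guard, never reached on Dom ∩ Pre
def decode1Loop (code r x : Int) : Nat → Int × Int
  | 0 => (r, x)
  | fuel + 1 =>
    if PySem.Int.mod (code + 1) (r * 2) = 0 then decode1Loop code (r * 2) (x + 1) fuel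
    else (r, x)

def decode1 (code : Int) : Int × Int :=
  let rx := decode1Loop code 1 0 64
  (rx.2, PySem.Int.floordiv (PySem.Int.floordiv (code + 1) rx.1 - 1) 2)

-- ===== PORT B =====
-- B's recursion; divmod(n,2) = (floordiv n 2, mod n 2); fuel (64) only a totality guard
def oddSplit (n x : Int) : Nat → Int × Int
  | 0 => (x, n)
  | fuel + 1 =>
    let q := PySem.Int.floordiv n 2
    if PySem.Int.mod n 2 = 0 then oddSplit q (x + 1) fuel
    else (x, q)

def decode1_alt (code : Int) : Int × Int := oddSplit (code + 1) 0 64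

-- ===== PRECONDITION & SPEC =====
-- Pre_ excludes only code = -1, on which A's while-loop (and B's recursion) never terminates.
def Pre_decode1 (code : Int) : Prop := code ≠ -1
instance (code : Int) : Decidable (Pre_decode1 code) := by unfold Pre_decode1; infer_instance
def pvWitness_decode1 : Int := 11

def Spec_decode1 (code : Int) (out : Int × Int) : Prop := out = decode1_alt code
instance (code : Int) (out : Int × Int) : Decidable (Spec_decode1 code out) := by unfold Spec_decode1; infer_instance

-- ===== CLAIM (what is proved, stated in full; the proofs are below) =====
def Claim_equal_decode1 : Prop := ∀ (code : Int), Dom_decode1 code → Pre_decode1 code → Spec_decode1 code (decode1 code)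

-- ===== LEMMAS AND PROOFS =====

-- core invariant: with code+1 = r * t, A's loop state (r, x) corresponds to B's state (t, x)
lemma decode1_key : ∀ (fuel : Nat) (t r x code : Int), t ≠ 0 → ¬ ((2 : Int) ^ fuel ∣ t) → 0 < r →
    code + 1 = r * t →
    ((decode1Loop code r x fuel).2,
      PySem.Int.floordiv (PySem.Int.floordiv (code + 1) (decode1Loop code r x fuel).1 - 1) 2)
      = oddSplit t x fuel := by
  intro fuel
  induction fuel with
  | zero =>
    intro t r x code ht hf hr hn
    simp at hf
  | succ f ih =>
    intro t r x code ht hf hr hn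
    have h2r : (0:Int) < r * 2 := by omega
    have hcond : (PySem.Int.mod (code + 1) (r * 2) = 0) ↔ (2:Int) ∣ t := by
      rw [PySem.Int.mod_eq_zero_iff_dvd _ _]
      constructor
      · rintro ⟨c, hc⟩
        refine ⟨c, ?_⟩
        have : r * t = r * (2 * c) := by rw [← hn, hc]; ring
        exact mul_left_cancel₀ (by omega) this
      · rintro ⟨c, hc⟩; exact ⟨c, by rw [hn, hc]; ring⟩
    by_cases hdvd : (2:Int) ∣ t
    · obtain ⟨u, hu⟩ := hdvd
      have hq : PySem.Int.floordiv t 2 = u := by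
        rw [PySem.Int.floordiv_eq_ediv_of_pos (by norm_num), hu]
        simp
      have hmod : PySem.Int.mod t 2 = 0 := by
        rw [PySem.Int.mod_eq_zero_iff_dvd _ _]; exact ⟨u, hu⟩
      simp only [decode1Loop, oddSplit, hcond.mpr ⟨u, hu⟩, if_pos, hmod, hq]
      exact ih u (r * 2) (x + 1) code (by rintro rfl; simp at hu; omega)
        (fun ⟨c, hc⟩ => hf ⟨c, by rw [hu, hc]; ring⟩) (by omega) (by rw [hn, hu]; ring)
    · have hmod : ¬ PySem.Int.mod t 2 = 0 := by
        rw [PySem.Int.mod_eq_zero_iff_dvd _ _]; exact hdvd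
      simp only [decode1Loop, oddSplit, hcond, if_neg hdvd, if_neg hmod]
      -- remaining: ((code+1) // r - 1) // 2 = t // 2 for odd t, code+1 = r*t
      have hdiv : PySem.Int.floordiv (code + 1) r = t := by
        rw [hn, PySem.Int.floordiv_eq_ediv_of_pos hr, Int.mul_ediv_cancel_left _ (by omega)]
      rw [hdiv]
      -- t odd: t % 2 = 1, so (t-1)//2 = t//2
      obtain ⟨k, hk⟩ : ∃ k, t = 2 * k + 1 := by
        have := Int.emod_two_eq t
        rcases this with h | h
        · exact absurd (Int.dvd_of_emod_eq_zero h) hdvd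
        · exact ⟨t / 2, by omega⟩
      have e1 : PySem.Int.floordiv (t - 1) 2 = k := by
        rw [PySem.Int.floordiv_eq_ediv_of_pos (by norm_num), hk]
        simp [show 2 * k + 1 - 1 = 2 * k by ring]
      have e2 : PySem.Int.floordiv t 2 = k := by
        rw [PySem.Int.floordiv_eq_ediv_of_pos (by norm_num), hk]; omega
      rw [e1, e2]

-- ===== VERDICT (by name: the statement is the Claim_ definition above) =====
theorem decode1_spec : Claim_equal_decode1 := by
  intro code hdom hpre
  unfold Spec_decode1 decode1 decode1_alt
  have hd : -2147483648 ≤ code ∧ code ≤ 2147483648 := by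
    simpa [Dom_decode1, pvDomInt] using hdom
  have ht : code + 1 ≠ 0 := fun h => hpre (by omega)
  have hfuel : ¬ ((2 : Int) ^ (64:Nat) ∣ (code + 1)) := by
    intro h
    have habs := Int.le_of_dvd (abs_pos.mpr ht) ((dvd_abs _ _).mpr h)
    have hp : (2:Int) ^ (64:Nat) = 18446744073709551616 := by norm_num
    rcases abs_cases (code + 1) with ⟨he, _⟩ | ⟨he, _⟩ <;> omega
  have := decode1_key 64 (code + 1) 1 0 code ht hfuel (by norm_num) (by ring)
  simpa using this
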